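-- pv_equiv track=rewrite | github.com/kimhaegyeong/LawFirmAI | scripts/tools/analyze_scripts.py | generate_migration_plan
-- ===== SOURCE A (Python) =====
-- from typing import Dict, List, Tuple
--
-- def generate_migration_plan(classification: Dict[str, List[str]]) -> Dict[str, List[Tuple[str, str]]]:
--     """파일 이동 계획 생성"""
--     plan = {
--         "testing/": [],
--         "verification/": [],
--         "checks/": [],
--         "monitoring/": [],
--         "analysis/": [],
--         "tools/": [],
--         "migrations/": [],
--         "setup/": [],
--         "scripts/": []
--     }
--
--     for file in classification.get("test", []):
--         plan["testing/"].append((file, f"testing/{file}"))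
--
--     for file in classification.get("verify", []):
--         plan["verification/"].append((file, f"verification/{file}"))
--
--     for file in classification.get("check", []):
--         plan["checks/"].append((file, f"checks/{file}"))
--
--     for file in classification.get("monitor", []):
--         plan["monitoring/"].append((file, f"monitoring/{file}"))
--
--     for file in classification.get("analyze", []):
--         plan["analysis/"].append((file, f"analysis/{file}"))
--
--     for file in classification.get("create", []) + classification.get("assign", []) + classification.get("wait", []):
--         plan["tools/"].append((file, f"tools/{file}"))
--
--     for file in classification.get("migrate", []):
--         plan["migrations/"].append((file, f"migrations/{file}"))
--
--     for file in classification.get("setup", []):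
--         plan["setup/"].append((file, f"setup/{file}"))
--
--     for file in classification.get("wrapper", []):
--         plan["scripts/"].append((file, f"scripts/{file}"))
--
--     for file in classification.get("other", []):
--         plan["tools/"].append((file, f"tools/{file}"))
--
--     return {k: v for k, v in plan.items() if v}
-- ===== SOURCE B (Python) =====
-- from typing import Dict, List, Tuple
--
-- _CAT = {
--     "test": ("testing/", 0), "verify": ("verification/", 0), "check": ("checks/", 0),
--     "monitor": ("monitoring/", 0), "analyze": ("analysis/", 0),
--     "create": ("tools/", 0), "assign": ("tools/", 1), "wait": ("tools/", 2), "other": ("tools/", 3),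
--     "migrate": ("migrations/", 0), "setup": ("setup/", 0), "wrapper": ("scripts/", 0),
-- }
-- _FOLDERS = ["testing/", "verification/", "checks/", "monitoring/", "analysis/",
--             "tools/", "migrations/", "setup/", "scripts/"]
--
-- def generate_migration_plan(classification: Dict[str, List[str]]) -> Dict[str, List[Tuple[str, str]]]:
--     """파일 이동 계획 생성"""
--     # Inverted index: one pass over the INPUT items files each contribution into a
--     # (folder, rank) slot; destinations are then assembled from the slots.
--     contrib = {}
--     for cat, files in classification.items():
--         fr = _CAT.get(cat)
--         if fr is not None:
--             folder, rank = fr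
--             contrib[(folder, rank)] = [(f, folder + f) for f in files]
--     plan = {}
--     for folder in _FOLDERS:
--         entries = [e for r in range(4) for e in contrib.get((folder, r), [])]
--         if entries:
--             plan[folder] = entries
--     return plan
-- ===== Notes on version B (the rewrite author's own statement) =====
-- stated objective: alternative
-- what changed: Instead of A's ten category-keyed lookups into the input dict appended into a pre-seeded nine-key plan and filtered, B makes one pass over the input's own items, filing each recognised category's files into an inverted (folder, rank) index, and then assembles each destination folder from its ranked slots.
import Mathlib
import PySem

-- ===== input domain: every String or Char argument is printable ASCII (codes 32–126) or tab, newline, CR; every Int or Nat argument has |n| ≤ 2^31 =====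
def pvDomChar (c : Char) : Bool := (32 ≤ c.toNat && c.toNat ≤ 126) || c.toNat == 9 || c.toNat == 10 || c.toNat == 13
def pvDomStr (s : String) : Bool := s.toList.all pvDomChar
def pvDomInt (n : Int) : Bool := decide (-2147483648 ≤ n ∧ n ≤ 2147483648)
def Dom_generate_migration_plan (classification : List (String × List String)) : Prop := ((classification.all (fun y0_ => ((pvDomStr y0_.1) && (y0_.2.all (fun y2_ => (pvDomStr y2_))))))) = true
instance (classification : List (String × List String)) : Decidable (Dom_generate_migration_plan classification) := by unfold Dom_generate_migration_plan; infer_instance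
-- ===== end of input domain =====

-- B replaces A's ten category-keyed lookups into the input (appended into a pre-seeded
-- nine-key plan, then filtered) by a single pass over the input's own items that files
-- each recognised category into an inverted (folder, rank) index, from which the
-- destination folders are assembled; objective: alternative decomposition.

-- ===== PORT A =====
def generate_migration_plan (classification : List (String × List String)) : List (String × List (String × String)) :=
  let get : String → List String := fun k => (PySem.Dict.mk classification).getD k []
  let plan : PySem.Dict String (List (String × String)) :=
    PySem.Dict.mk [("testing/", []), ("verification/", []), ("checks/", []), ("monitoring/", []),
      ("analysis/", []), ("tools/", []), ("migrations/", []), ("setup/", []), ("scripts/", [])]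
  let plan := (get "test").foldl (fun d file => d.modify "testing/" [] (· ++ [(file, "testing/" ++ file)])) plan
  let plan := (get "verify").foldl (fun d file => d.modify "verification/" [] (· ++ [(file, "verification/" ++ file)])) plan
  let plan := (get "check").foldl (fun d file => d.modify "checks/" [] (· ++ [(file, "checks/" ++ file)])) plan
  let plan := (get "monitor").foldl (fun d file => d.modify "monitoring/" [] (· ++ [(file, "monitoring/" ++ file)])) plan
  let plan := (get "analyze").foldl (fun d file => d.modify "analysis/" [] (· ++ [(file, "analysis/" ++ file)])) plan
  let plan := ((get "create") ++ (get "assign") ++ (get "wait")).foldl (fun d file => d.modify "tools/" [] (· ++ [(file, "tools/" ++ file)])) plan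
  let plan := (get "migrate").foldl (fun d file => d.modify "migrations/" [] (· ++ [(file, "migrations/" ++ file)])) plan
  let plan := (get "setup").foldl (fun d file => d.modify "setup/" [] (· ++ [(file, "setup/" ++ file)])) plan
  let plan := (get "wrapper").foldl (fun d file => d.modify "scripts/" [] (· ++ [(file, "scripts/" ++ file)])) plan
  let plan := (get "other").foldl (fun d file => d.modify "tools/" [] (· ++ [(file, "tools/" ++ file)])) plan
  plan.items.filter (fun p => !p.2.isEmpty)

-- ===== PORT B =====
-- Source B's _CAT: category → (destination folder, rank inside that folder)
def pvCat : List (String × (String × Int)) :=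
  [("test", ("testing/", 0)), ("verify", ("verification/", 0)), ("check", ("checks/", 0)),
   ("monitor", ("monitoring/", 0)), ("analyze", ("analysis/", 0)),
   ("create", ("tools/", 0)), ("assign", ("tools/", 1)), ("wait", ("tools/", 2)), ("other", ("tools/", 3)),
   ("migrate", ("migrations/", 0)), ("setup", ("setup/", 0)), ("wrapper", ("scripts/", 0))]

-- Source B's _FOLDERS
def pvFolders : List String :=
  ["testing/", "verification/", "checks/", "monitoring/", "analysis/",
   "tools/", "migrations/", "setup/", "scripts/"]

-- _CAT.get(cat)
def pvFR (cat : String) : Option (String × Int) := (PySem.Dict.mk pvCat).get? cat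

-- one iteration of Source B's first loop (file the item into the inverted index)
def pvStep (d : PySem.Dict (String × Int) (List (String × String))) (p : String × List String) :
    PySem.Dict (String × Int) (List (String × String)) :=
  match pvFR p.1 with
  | none => d
  | some fr => d.insert fr (p.2.map (fun f => (f, fr.1 ++ f)))

def generate_migration_plan_alt (classification : List (String × List String)) : List (String × List (String × String)) :=
  let contrib := classification.foldl pvStep PySem.Dict.empty
  pvFolders.foldl (fun plan folder =>
    let entries := (PySem.List.pyRange 0 4 1).flatMap (fun r => contrib.getD (folder, r) [])
    if entries.isEmpty then plan else plan ++ [(folder, entries)]) []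

-- ===== PRECONDITION & SPEC =====
-- Pre_ excludes association lists with duplicate keys: a Python dict argument can never
-- have them, and on such lists A's first-match lookup vs B's overwriting index are both
-- accidental readings of a representation Python itself cannot produce.
def Pre_generate_migration_plan (classification : List (String × List String)) : Prop :=
  (classification.map Prod.fst).Nodup
instance (classification : List (String × List String)) : Decidable (Pre_generate_migration_plan classification) := by unfold Pre_generate_migration_plan; infer_instance

def pvWitness_generate_migration_plan : (List (String × List String)) :=
  [("test", ["a.py"]), ("other", ["b.py"])]

def Spec_generate_migration_plan (classification : List (String × List String)) (out : List (String × List (String × String))) : Prop := out = generate_migration_plan_alt classification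
instance (classification : List (String × List String)) (out : List (String × List (String × String))) : Decidable (Spec_generate_migration_plan classification out) := by unfold Spec_generate_migration_plan; infer_instance

-- ===== CLAIM (what is proved, stated in full; the proofs are below) =====
def Claim_equal_generate_migration_plan : Prop := ∀ (classification : List (String × List String)), Dom_generate_migration_plan classification → Pre_generate_migration_plan classification → Spec_generate_migration_plan classification (generate_migration_plan classification)

-- ===== LEMMAS AND PROOFS =====

-- One of A's append-loops at a fixed key K: the items list keeps its keys and order,
-- only the (unique) entry at K grows by the mapped list.
theorem pv_items_loop (K : String) (mk : String → String × String) (xs : List String)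
    (d : PySem.Dict String (List (String × String))) (hn : d.keys.Nodup)
    (hc : d.contains K = true) :
    (xs.foldl (fun d file => d.modify K [] (fun v => v ++ [mk file])) d).items
      = d.items.map (fun p => if p.1 == K then (p.1, p.2 ++ xs.map mk) else p) := by
  induction xs generalizing d with
  | nil =>
    simp only [List.foldl_nil, List.map_nil, List.append_nil]
    refine Eq.symm (Eq.trans (List.map_congr_left ?_) (List.map_id _))
    intro p _; split <;> rfl
  | cons x xs ih =>
    simp only [List.foldl_cons]
    rw [show (d.modify K [] (fun v => v ++ [mk x])) = d.insert K (d.getD K [] ++ [mk x]) from rfl]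
    rw [ih _ (by rw [PySem.Dict.keys_insert_of_contains _ _ hc]; exact hn)
             (by rw [PySem.Dict.contains_insert]; simp)]
    rw [PySem.Dict.items_insert_of_contains _ _ hc]
    rw [List.map_map]
    apply List.map_congr_left
    intro p hp
    by_cases hK : (p.1 == K) = true
    · have hK' : p.1 = K := beq_iff_eq.mp hK
      have hv : d.getD K [] = p.2 := by
        refine PySem.Dict.getD_of_mem_items _ ?_ hn _
        rw [← hK']; exact (Prod.mk.eta ▸ hp)
      simp [Function.comp, hK', hv]
    · simp [Function.comp, hK]

-- keys (hence Nodup and contains) are preserved by one of A's loops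
theorem pv_keys_loop (K : String) (mk : String → String × String) (xs : List String)
    (d : PySem.Dict String (List (String × String))) (hn : d.keys.Nodup)
    (hc : d.contains K = true) :
    (xs.foldl (fun d file => d.modify K [] (fun v => v ++ [mk file])) d).keys = d.keys := by
  show ((xs.foldl (fun d file => d.modify K [] (fun v => v ++ [mk file])) d).items).map Prod.fst
      = d.items.map Prod.fst
  rw [pv_items_loop K mk xs d hn hc, List.map_map]
  apply List.map_congr_left
  intro p _
  by_cases h : (p.1 == K) = true <;> simp [Function.comp, h]

-- the per-folder bucket both programs produce, named for the proof
def pvE (cls : List (String × List String)) (row : String × List String) : String × List (String × String) :=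
  (row.1, row.2.flatMap (fun c => ((PySem.Dict.mk cls).getD c []).map (fun f => (f, row.1 ++ f))))

-- A's table of destination folders with their source categories (proof-side only)
def pvTable : List (String × List String) :=
  [("testing/", ["test"]), ("verification/", ["verify"]), ("checks/", ["check"]),
   ("monitoring/", ["monitor"]), ("analysis/", ["analyze"]),
   ("tools/", ["create", "assign", "wait", "other"]),
   ("migrations/", ["migrate"]), ("setup/", ["setup"]), ("scripts/", ["wrapper"])]

-- a list of pairs whose second components are distinct determines fst from snd
theorem pv_snd_inj {α β : Type} [DecidableEq β] (L : List (α × β))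
    (h : (L.map Prod.snd).Nodup) {k c : α} {p : β}
    (hk : (k, p) ∈ L) (hc : (c, p) ∈ L) : k = c := by
  induction L with
  | nil => cases hk
  | cons a L ih =>
    simp only [List.map_cons, List.nodup_cons] at h
    rcases List.mem_cons.mp hk with hk1 | hk2 <;> rcases List.mem_cons.mp hc with hc1 | hc2
    · exact congrArg Prod.fst (hk1.trans hc1.symm)
    · exfalso; apply h.1; rw [← hk1]
      exact List.mem_map.mpr ⟨(c, p), hc2, rfl⟩
    · exfalso; apply h.1; rw [← hc1]
      exact List.mem_map.mpr ⟨(k, p), hk2, rfl⟩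
    · exact ih h.2 hk2 hc2

-- pvFR hits determine the category: the (folder, rank) slots in pvCat are distinct
theorem pv_fr_inj {k c : String} {q : String × Int}
    (hk : pvFR k = some q) (hc : pvFR c = some q) : k = c := by
  have hk' : (k, q) ∈ pvCat := PySem.Dict.mem_items_of_get?_eq_some _ hk
  have hc' : (c, q) ∈ pvCat := PySem.Dict.mem_items_of_get?_eq_some _ hc
  exact pv_snd_inj pvCat (by decide) hk' hc'

-- B's index at the slot pvCat assigns to category c ≡ A's first-match lookup of c,
-- on inputs without duplicate keys.
theorem pv_contrib_hit (cls : List (String × List String))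
    (hn : (cls.map Prod.fst).Nodup) (c : String) (q : String × Int)
    (hq : pvFR c = some q) (d0 : PySem.Dict (String × Int) (List (String × String))) :
    (cls.foldl pvStep d0).getD q [] =
      match (PySem.Dict.mk cls).get? c with
      | some vs => vs.map (fun f => (f, q.1 ++ f))
      | none => d0.getD q [] := by
  induction cls generalizing d0 with
  | nil => rfl
  | cons p cls ih =>
    simp only [List.map_cons, List.nodup_cons] at hn
    simp only [List.foldl_cons]
    rw [show (PySem.Dict.mk (p :: cls)) = PySem.Dict.mk ((p.1, p.2) :: cls) by rw [Prod.mk.eta],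
        PySem.Dict.get?_mk_cons]
    by_cases hpc : p.1 = c
    · have hnone : (PySem.Dict.mk cls).get? c = none := by
        rw [PySem.Dict.get?_eq_none_iff_not_mem_keys]
        show c ∉ (PySem.Dict.mk cls).items.map Prod.fst
        exact hpc ▸ hn.1
      simp only [hpc, beq_self_eq_true, if_true]
      rw [ih hn.2, hnone]
      show (pvStep d0 p).getD q [] = _
      unfold pvStep
      rw [hpc, hq]
      simp [PySem.Dict.getD_insert_self]
    · have hbeq : (p.1 == c) = false := beq_eq_false_iff_ne.mpr hpc
      rw [hbeq]
      simp only [Bool.false_eq_true, if_false]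
      rw [ih hn.2]
      cases (PySem.Dict.mk cls).get? c with
      | some vs => rfl
      | none =>
        show (pvStep d0 p).getD q [] = d0.getD q []
        unfold pvStep
        cases hf : pvFR p.1 with
        | none => rfl
        | some fr =>
          exact PySem.Dict.getD_insert_of_ne _ _ _ (fun h => hpc (pv_fr_inj hf (h ▸ hq)))

-- slots no category maps to stay empty through B's pass
theorem pv_contrib_miss (cls : List (String × List String)) (q : String × Int)
    (hq : q ∉ pvCat.map Prod.snd) (d0 : PySem.Dict (String × Int) (List (String × String))) :
    (cls.foldl pvStep d0).getD q [] = d0.getD q [] := by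
  induction cls generalizing d0 with
  | nil => rfl
  | cons p cls ih =>
    simp only [List.foldl_cons]
    rw [ih]
    unfold pvStep
    cases hf : pvFR p.1 with
    | none => rfl
    | some fr =>
      have hfr : fr ∈ pvCat.map Prod.snd :=
        List.mem_map_of_mem (PySem.Dict.mem_items_of_get?_eq_some _ hf)
      exact PySem.Dict.getD_insert_of_ne _ _ _ (fun h => hq (h ▸ hfr))

-- B's index value at a hit slot, stated through A's getD
theorem pv_contrib_hit' (cls : List (String × List String))
    (hn : (cls.map Prod.fst).Nodup) (c : String) (q : String × Int)
    (hq : pvFR c = some q) :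
    (cls.foldl pvStep PySem.Dict.empty).getD q [] =
      ((PySem.Dict.mk cls).getD c []).map (fun f => (f, q.1 ++ f)) := by
  rw [pv_contrib_hit cls hn c q hq PySem.Dict.empty]
  cases hg : (PySem.Dict.mk cls).get? c <;>
    simp [hg, PySem.Dict.getD_eq_get?_getD]

-- B assembles exactly the non-empty pvE buckets, in table order
theorem pv_alt_eq (cls : List (String × List String)) (hn : (cls.map Prod.fst).Nodup) :
    generate_migration_plan_alt cls
      = (pvTable.filter (fun row => !(pvE cls row).2.isEmpty)).map (pvE cls) := by
  have hdef : generate_migration_plan_alt cls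
      = pvFolders.foldl (fun plan folder =>
          if ((PySem.List.pyRange 0 4 1).flatMap
                (fun r => (cls.foldl pvStep PySem.Dict.empty).getD (folder, r) [])).isEmpty
          then plan
          else plan ++ [(folder, (PySem.List.pyRange 0 4 1).flatMap
                (fun r => (cls.foldl pvStep PySem.Dict.empty).getD (folder, r) []))]) [] := rfl
  rw [hdef]
  have hfold : pvFolders = pvTable.map Prod.fst := by decide
  rw [hfold, List.foldl_map]
  have hrange : PySem.List.pyRange 0 4 1 = [0, 1, 2, 3] := by decide
  have hE : ∀ row ∈ pvTable,
      ((PySem.List.pyRange 0 4 1).flatMap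
        (fun r => (cls.foldl pvStep PySem.Dict.empty).getD (row.1, r) [])) = (pvE cls row).2 := by
    intro row hrow
    fin_cases hrow
    · simp only [hrange, List.flatMap_cons, List.flatMap_nil]
      rw [pv_contrib_hit' cls hn "test" ("testing/", 0) (by rfl),
          pv_contrib_miss cls ("testing/", 1) (by decide),
          pv_contrib_miss cls ("testing/", 2) (by decide),
          pv_contrib_miss cls ("testing/", 3) (by decide)]
      simp [pvE, PySem.Dict.getD_empty]
    · simp only [hrange, List.flatMap_cons, List.flatMap_nil]
      rw [pv_contrib_hit' cls hn "verify" ("verification/", 0) (by rfl),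
          pv_contrib_miss cls ("verification/", 1) (by decide),
          pv_contrib_miss cls ("verification/", 2) (by decide),
          pv_contrib_miss cls ("verification/", 3) (by decide)]
      simp [pvE, PySem.Dict.getD_empty]
    · simp only [hrange, List.flatMap_cons, List.flatMap_nil]
      rw [pv_contrib_hit' cls hn "check" ("checks/", 0) (by rfl),
          pv_contrib_miss cls ("checks/", 1) (by decide),
          pv_contrib_miss cls ("checks/", 2) (by decide),
          pv_contrib_miss cls ("checks/", 3) (by decide)]
      simp [pvE, PySem.Dict.getD_empty]
    · simp only [hrange, List.flatMap_cons, List.flatMap_nil]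
      rw [pv_contrib_hit' cls hn "monitor" ("monitoring/", 0) (by rfl),
          pv_contrib_miss cls ("monitoring/", 1) (by decide),
          pv_contrib_miss cls ("monitoring/", 2) (by decide),
          pv_contrib_miss cls ("monitoring/", 3) (by decide)]
      simp [pvE, PySem.Dict.getD_empty]
    · simp only [hrange, List.flatMap_cons, List.flatMap_nil]
      rw [pv_contrib_hit' cls hn "analyze" ("analysis/", 0) (by rfl),
          pv_contrib_miss cls ("analysis/", 1) (by decide),
          pv_contrib_miss cls ("analysis/", 2) (by decide),
          pv_contrib_miss cls ("analysis/", 3) (by decide)]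
      simp [pvE, PySem.Dict.getD_empty]
    · simp only [hrange, List.flatMap_cons, List.flatMap_nil]
      rw [pv_contrib_hit' cls hn "create" ("tools/", 0) (by rfl),
          pv_contrib_hit' cls hn "assign" ("tools/", 1) (by rfl),
          pv_contrib_hit' cls hn "wait" ("tools/", 2) (by rfl),
          pv_contrib_hit' cls hn "other" ("tools/", 3) (by rfl)]
      simp [pvE]
    · simp only [hrange, List.flatMap_cons, List.flatMap_nil]
      rw [pv_contrib_hit' cls hn "migrate" ("migrations/", 0) (by rfl),
          pv_contrib_miss cls ("migrations/", 1) (by decide),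
          pv_contrib_miss cls ("migrations/", 2) (by decide),
          pv_contrib_miss cls ("migrations/", 3) (by decide)]
      simp [pvE, PySem.Dict.getD_empty]
    · simp only [hrange, List.flatMap_cons, List.flatMap_nil]
      rw [pv_contrib_hit' cls hn "setup" ("setup/", 0) (by rfl),
          pv_contrib_miss cls ("setup/", 1) (by decide),
          pv_contrib_miss cls ("setup/", 2) (by decide),
          pv_contrib_miss cls ("setup/", 3) (by decide)]
      simp [pvE, PySem.Dict.getD_empty]
    · simp only [hrange, List.flatMap_cons, List.flatMap_nil]
      rw [pv_contrib_hit' cls hn "wrapper" ("scripts/", 0) (by rfl),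
          pv_contrib_miss cls ("scripts/", 1) (by decide),
          pv_contrib_miss cls ("scripts/", 2) (by decide),
          pv_contrib_miss cls ("scripts/", 3) (by decide)]
      simp [pvE, PySem.Dict.getD_empty]
  rw [PySem.List.foldl_congr_mem _ _
        (fun plan row => if ((pvE cls row).2.isEmpty) then plan else plan ++ [pvE cls row]) _
        (by intro acc row hrow
            rw [hE row hrow]
            rfl)]
  have hb : (fun (plan : List (String × List (String × String))) (row : String × List String) =>
        if ((pvE cls row).2.isEmpty) then plan else plan ++ [pvE cls row])
      = fun plan row => if (!(pvE cls row).2.isEmpty) = true then plan ++ [pvE cls row] else plan := by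
    funext plan row
    cases h : (pvE cls row).2.isEmpty <;> simp_all
  rw [hb, PySem.List.foldl_append_if]
  simp

-- A's append-loop at key K, named so the chained proof stays readable
def pvLoop (K : String) (xs : List String) (d : PySem.Dict String (List (String × String))) : PySem.Dict String (List (String × String)) :=
  xs.foldl (fun d file => d.modify K [] (fun v => v ++ [(file, K ++ file)])) d

theorem pvLoop_items (K : String) (xs : List String) (d : PySem.Dict String (List (String × String)))
    (hn : d.keys.Nodup) (hc : d.contains K = true) :
    (pvLoop K xs d).items
      = d.items.map (fun p => if p.1 == K then (p.1, p.2 ++ xs.map (fun f => (f, K ++ f))) else p) :=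
  pv_items_loop K _ xs d hn hc

theorem pvLoop_keys (K : String) (xs : List String) (d : PySem.Dict String (List (String × String)))
    (hn : d.keys.Nodup) (hc : d.contains K = true) :
    (pvLoop K xs d).keys = d.keys :=
  pv_keys_loop K _ xs d hn hc

theorem generate_migration_plan_eq (classification : List (String × List String))
    (hn : (classification.map Prod.fst).Nodup) :
    generate_migration_plan classification = generate_migration_plan_alt classification := by
  rw [pv_alt_eq classification hn]
  show ((pvLoop "tools/" ((PySem.Dict.mk classification).getD "other" []) (pvLoop "scripts/" ((PySem.Dict.mk classification).getD "wrapper" []) (pvLoop "setup/" ((PySem.Dict.mk classification).getD "setup" []) (pvLoop "migrations/" ((PySem.Dict.mk classification).getD "migrate" []) (pvLoop "tools/" (((PySem.Dict.mk classification).getD "create" []) ++ ((PySem.Dict.mk classification).getD "assign" []) ++ ((PySem.Dict.mk classification).getD "wait" [])) (pvLoop "analysis/" ((PySem.Dict.mk classification).getD "analyze" []) (pvLoop "monitoring/" ((PySem.Dict.mk classification).getD "monitor" []) (pvLoop "checks/" ((PySem.Dict.mk classification).getD "check" []) (pvLoop "verification/" ((PySem.Dict.mk classification).getD "verify" []) (pvLoop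 "testing/" ((PySem.Dict.mk classification).getD "test" []) (PySem.Dict.mk [("testing/", ([] : List (String × String))), ("verification/", []), ("checks/", []), ("monitoring/", []), ("analysis/", []), ("tools/", []), ("migrations/", []), ("setup/", []), ("scripts/", [])])))))))))))).items.filter (fun p => !p.2.isEmpty)
      = (pvTable.filter (fun row => !(pvE classification row).2.isEmpty)).map (pvE classification)
  have k0 : ((PySem.Dict.mk [("testing/", ([] : List (String × String))), ("verification/", []), ("checks/", []), ("monitoring/", []), ("analysis/", []), ("tools/", []), ("migrations/", []), ("setup/", []), ("scripts/", [])]) : PySem.Dict String (List (String × String))).keys = ["testing/", "verification/", "checks/", "monitoring/", "analysis/", "tools/", "migrations/", "setup/", "scripts/"] := by decide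
  have k1 : ((pvLoop "testing/" ((PySem.Dict.mk classification).getD "test" []) (PySem.Dict.mk [("testing/", ([] : List (String × String))), ("verification/", []), ("checks/", []), ("monitoring/", []), ("analysis/", []), ("tools/", []), ("migrations/", []), ("setup/", []), ("scripts/", [])]))).keys = ["testing/", "verification/", "checks/", "monitoring/", "analysis/", "tools/", "migrations/", "setup/", "scripts/"] := by
    rw [pvLoop_keys _ _ _ (by rw [k0]; decide) ((PySem.Dict.contains_iff_mem_keys _ _).mpr (by rw [k0]; decide))]
    exact k0
  have k2 : ((pvLoop "verification/" ((PySem.Dict.mk classification).getD "verify" []) (pvLoop "testing/" ((PySem.Dict.mk classification).getD "test" []) (PySem.Dict.mk [("testing/", ([] : List (String × String))), ("verification/", []), ("checks/", []), ("monitoring/", []), ("analysis/", []), ("tools/", []), ("migrations/", []), ("setup/", []), ("scripts/", [])])))).keys = ["testing/", "verification/", "checks/", "monitoring/", "analysis/", "tools/", "migrations/", "setup/", "scripts/"] := by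
    rw [pvLoop_keys _ _ _ (by rw [k1]; decide) ((PySem.Dict.contains_iff_mem_keys _ _).mpr (by rw [k1]; decide))]
    exact k1
  have k3 : ((pvLoop "checks/" ((PySem.Dict.mk classification).getD "check" []) (pvLoop "verification/" ((PySem.Dict.mk classification).getD "verify" []) (pvLoop "testing/" ((PySem.Dict.mk classification).getD "test" []) (PySem.Dict.mk [("testing/", ([] : List (String × String))), ("verification/", []), ("checks/", []), ("monitoring/", []), ("analysis/", []), ("tools/", []), ("migrations/", []), ("setup/", []), ("scripts/", [])]))))).keys = ["testing/", "verification/", "checks/", "monitoring/", "analysis/", "tools/", "migrations/", "setup/", "scripts/"] := by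
    rw [pvLoop_keys _ _ _ (by rw [k2]; decide) ((PySem.Dict.contains_iff_mem_keys _ _).mpr (by rw [k2]; decide))]
    exact k2
  have k4 : ((pvLoop "monitoring/" ((PySem.Dict.mk classification).getD "monitor" []) (pvLoop "checks/" ((PySem.Dict.mk classification).getD "check" []) (pvLoop "verification/" ((PySem.Dict.mk classification).getD "verify" []) (pvLoop "testing/" ((PySem.Dict.mk classification).getD "test" []) (PySem.Dict.mk [("testing/", ([] : List (String × String))), ("verification/", []), ("checks/", []), ("monitoring/", []), ("analysis/", []), ("tools/", []), ("migrations/", []), ("setup/", []), ("scripts/", [])])))))).keys = ["testing/", "verification/", "checks/", "monitoring/", "analysis/", "tools/", "migrations/", "setup/", "scripts/"] := by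
    rw [pvLoop_keys _ _ _ (by rw [k3]; decide) ((PySem.Dict.contains_iff_mem_keys _ _).mpr (by rw [k3]; decide))]
    exact k3
  have k5 : ((pvLoop "analysis/" ((PySem.Dict.mk classification).getD "analyze" []) (pvLoop "monitoring/" ((PySem.Dict.mk classification).getD "monitor" []) (pvLoop "checks/" ((PySem.Dict.mk classification).getD "check" []) (pvLoop "verification/" ((PySem.Dict.mk classification).getD "verify" []) (pvLoop "testing/" ((PySem.Dict.mk classification).getD "test" []) (PySem.Dict.mk [("testing/", ([] : List (String × String))), ("verification/", []), ("checks/", []), ("monitoring/", []), ("analysis/", []), ("tools/", []), ("migrations/", []), ("setup/", []), ("scripts/", [])]))))))).keys = ["testing/", "verification/", "checks/", "monitoring/", "analysis/", "tools/", "migrations/", "setup/", "scripts/"] := by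
    rw [pvLoop_keys _ _ _ (by rw [k4]; decide) ((PySem.Dict.contains_iff_mem_keys _ _).mpr (by rw [k4]; decide))]
    exact k4
  have k6 : ((pvLoop "tools/" (((PySem.Dict.mk classification).getD "create" []) ++ ((PySem.Dict.mk classification).getD "assign" []) ++ ((PySem.Dict.mk classification).getD "wait" [])) (pvLoop "analysis/" ((PySem.Dict.mk classification).getD "analyze" []) (pvLoop "monitoring/" ((PySem.Dict.mk classification).getD "monitor" []) (pvLoop "checks/" ((PySem.Dict.mk classification).getD "check" []) (pvLoop "verification/" ((PySem.Dict.mk classification).getD "verify" []) (pvLoop "testing/" ((PySem.Dict.mk classification).getD "test" []) (PySem.Dict.mk [("testing/", ([] : List (String × String))), ("verification/", []), ("checks/", []), ("monitoring/", []), ("analysis/", []), ("tools/", []), ("migrations/", []), ("setup/", []), ("scripts/", [])])))))))).keys = ["testing/", "verification/", "checks/", "monitoring/", "analysis/", "tools/", "migrations/", "setup/", "scripts/"] := by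
    rw [pvLoop_keys _ _ _ (by rw [k5]; decide) ((PySem.Dict.contains_iff_mem_keys _ _).mpr (by rw [k5]; decide))]
    exact k5
  have k7 : ((pvLoop "migrations/" ((PySem.Dict.mk classification).getD "migrate" []) (pvLoop "tools/" (((PySem.Dict.mk classification).getD "create" []) ++ ((PySem.Dict.mk classification).getD "assign" []) ++ ((PySem.Dict.mk classification).getD "wait" [])) (pvLoop "analysis/" ((PySem.Dict.mk classification).getD "analyze" []) (pvLoop "monitoring/" ((PySem.Dict.mk classification).getD "monitor" []) (pvLoop "checks/" ((PySem.Dict.mk classification).getD "check" []) (pvLoop "verification/" ((PySem.Dict.mk classification).getD "verify" []) (pvLoop "testing/" ((PySem.Dict.mk classification).getD "test" []) (PySem.Dict.mk [("testing/", ([] : List (String × String))), ("verification/", []), ("checks/", []), ("monitoring/", []), ("analysis/", []), ("tools/", []), ("migrations/", []), ("setup/", []), ("scripts/", [])]))))))))).keys = ["testing/", "verification/", "checks/", "monitoring/", "analysis/", "tools/", "migrations/", "setup/", "scripts/"] := by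
    rw [pvLoop_keys _ _ _ (by rw [k6]; decide) ((PySem.Dict.contains_iff_mem_keys _ _).mpr (by rw [k6]; decide))]
    exact k6
  have k8 : ((pvLoop "setup/" ((PySem.Dict.mk classification).getD "setup" []) (pvLoop "migrations/" ((PySem.Dict.mk classification).getD "migrate" []) (pvLoop "tools/" (((PySem.Dict.mk classification).getD "create" []) ++ ((PySem.Dict.mk classification).getD "assign" []) ++ ((PySem.Dict.mk classification).getD "wait" [])) (pvLoop "analysis/" ((PySem.Dict.mk classification).getD "analyze" []) (pvLoop "monitoring/" ((PySem.Dict.mk classification).getD "monitor" []) (pvLoop "checks/" ((PySem.Dict.mk classification).getD "check" []) (pvLoop "verification/" ((PySem.Dict.mk classification).getD "verify" []) (pvLoop "testing/" ((PySem.Dict.mk classification).getD "test" []) (PySem.Dict.mk [("testing/", ([] : List (String × String))), ("verification/", []), ("checks/", []), ("monitoring/", []), ("analysis/", []), ("tools/", []), ("migrations/", []), ("setup/", []), ("scripts/", [])])))))))))).keys = ["testing/", "verification/", "checks/", "monitoring/", "analysis/", "tools/", "migrations/", "setup/", "scripts/"] := by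
    rw [pvLoop_keys _ _ _ (by rw [k7]; decide) ((PySem.Dict.contains_iff_mem_keys _ _).mpr (by rw [k7]; decide))]
    exact k7
  have k9 : ((pvLoop "scripts/" ((PySem.Dict.mk classification).getD "wrapper" []) (pvLoop "setup/" ((PySem.Dict.mk classification).getD "setup" []) (pvLoop "migrations/" ((PySem.Dict.mk classification).getD "migrate" []) (pvLoop "tools/" (((PySem.Dict.mk classification).getD "create" []) ++ ((PySem.Dict.mk classification).getD "assign" []) ++ ((PySem.Dict.mk classification).getD "wait" [])) (pvLoop "analysis/" ((PySem.Dict.mk classification).getD "analyze" []) (pvLoop "monitoring/" ((PySem.Dict.mk classification).getD "monitor" []) (pvLoop "checks/" ((PySem.Dict.mk classification).getD "check" []) (pvLoop "verification/" ((PySem.Dict.mk classification).getD "verify" []) (pvLoop "testing/" ((PySem.Dict.mk classification).getD "test" []) (PySem.Dict.mk [("testing/", ([] : List (String × String))), ("verification/", []), ("checks/", []), ("monitoring/", []), ("analysis/", []), ("tools/", []), ("migrations/", []), ("setup/", []), ("scripts/", [])]))))))))))).keys = ["testing/", "verification/", "checks/", "monitoring/", "analysis/", "tools/", "migrations/", "setup/",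 "scripts/"] := by
    rw [pvLoop_keys _ _ _ (by rw [k8]; decide) ((PySem.Dict.contains_iff_mem_keys _ _).mpr (by rw [k8]; decide))]
    exact k8
  have i1 := pvLoop_items "testing/" ((PySem.Dict.mk classification).getD "test" []) (PySem.Dict.mk [("testing/", ([] : List (String × String))), ("verification/", []), ("checks/", []), ("monitoring/", []), ("analysis/", []), ("tools/", []), ("migrations/", []), ("setup/", []), ("scripts/", [])]) (by rw [k0]; decide) ((PySem.Dict.contains_iff_mem_keys _ _).mpr (by rw [k0]; decide))
  have i2 := pvLoop_items "verification/" ((PySem.Dict.mk classification).getD "verify" []) (pvLoop "testing/" ((PySem.Dict.mk classification).getD "test" []) (PySem.Dict.mk [("testing/", ([] : List (String × String))), ("verification/", []), ("checks/", []), ("monitoring/", []), ("analysis/", []), ("tools/", []), ("migrations/", []), ("setup/", []), ("scripts/", [])])) (by rw [k1]; decide) ((PySem.Dict.contains_iff_mem_keys _ _).mpr (by rw [k1]; decide))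
  have i3 := pvLoop_items "checks/" ((PySem.Dict.mk classification).getD "check" []) (pvLoop "verification/" ((PySem.Dict.mk classification).getD "verify" []) (pvLoop "testing/" ((PySem.Dict.mk classification).getD "test" []) (PySem.Dict.mk [("testing/", ([] : List (String × String))), ("verification/", []), ("checks/", []), ("monitoring/", []), ("analysis/", []), ("tools/", []), ("migrations/", []), ("setup/", []), ("scripts/", [])]))) (by rw [k2]; decide) ((PySem.Dict.contains_iff_mem_keys _ _).mpr (by rw [k2]; decide))
  have i4 := pvLoop_items "monitoring/" ((PySem.Dict.mk classification).getD "monitor" []) (pvLoop "checks/" ((PySem.Dict.mk classification).getD "check" []) (pvLoop "verification/" ((PySem.Dict.mk classification).getD "verify" []) (pvLoop "testing/" ((PySem.Dict.mk classification).getD "test" []) (PySem.Dict.mk [("testing/", ([] : List (String × String))), ("verification/", []), ("checks/", []), ("monitoring/", []), ("analysis/", []), ("tools/", []), ("migrations/", []), ("setup/", []), ("scripts/", [])])))) (by rw [k3]; decide) ((PySem.Dict.contains_iff_mem_keys _ _).mpr (by rw [k3]; decide))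
  have i5 := pvLoop_items "analysis/" ((PySem.Dict.mk classification).getD "analyze" []) (pvLoop "monitoring/" ((PySem.Dict.mk classification).getD "monitor" []) (pvLoop "checks/" ((PySem.Dict.mk classification).getD "check" []) (pvLoop "verification/" ((PySem.Dict.mk classification).getD "verify" []) (pvLoop "testing/" ((PySem.Dict.mk classification).getD "test" []) (PySem.Dict.mk [("testing/", ([] : List (String × String))), ("verification/", []), ("checks/", []), ("monitoring/", []), ("analysis/", []), ("tools/", []), ("migrations/", []), ("setup/", []), ("scripts/", [])]))))) (by rw [k4]; decide) ((PySem.Dict.contains_iff_mem_keys _ _).mpr (by rw [k4]; decide))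
  have i6 := pvLoop_items "tools/" (((PySem.Dict.mk classification).getD "create" []) ++ ((PySem.Dict.mk classification).getD "assign" []) ++ ((PySem.Dict.mk classification).getD "wait" [])) (pvLoop "analysis/" ((PySem.Dict.mk classification).getD "analyze" []) (pvLoop "monitoring/" ((PySem.Dict.mk classification).getD "monitor" []) (pvLoop "checks/" ((PySem.Dict.mk classification).getD "check" []) (pvLoop "verification/" ((PySem.Dict.mk classification).getD "verify" []) (pvLoop "testing/" ((PySem.Dict.mk classification).getD "test" []) (PySem.Dict.mk [("testing/", ([] : List (String × String))), ("verification/", []), ("checks/", []), ("monitoring/", []), ("analysis/", []), ("tools/", []), ("migrations/", []), ("setup/", []), ("scripts/", [])])))))) (by rw [k5]; decide) ((PySem.Dict.contains_iff_mem_keys _ _).mpr (by rw [k5]; decide))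
  have i7 := pvLoop_items "migrations/" ((PySem.Dict.mk classification).getD "migrate" []) (pvLoop "tools/" (((PySem.Dict.mk classification).getD "create" []) ++ ((PySem.Dict.mk classification).getD "assign" []) ++ ((PySem.Dict.mk classification).getD "wait" [])) (pvLoop "analysis/" ((PySem.Dict.mk classification).getD "analyze" []) (pvLoop "monitoring/" ((PySem.Dict.mk classification).getD "monitor" []) (pvLoop "checks/" ((PySem.Dict.mk classification).getD "check" []) (pvLoop "verification/" ((PySem.Dict.mk classification).getD "verify" []) (pvLoop "testing/" ((PySem.Dict.mk classification).getD "test" []) (PySem.Dict.mk [("testing/", ([] : List (String × String))), ("verification/", []), ("checks/", []), ("monitoring/", []), ("analysis/", []), ("tools/", []), ("migrations/", []), ("setup/", []), ("scripts/", [])]))))))) (by rw [k6]; decide) ((PySem.Dict.contains_iff_mem_keys _ _).mpr (by rw [k6]; decide))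
  have i8 := pvLoop_items "setup/" ((PySem.Dict.mk classification).getD "setup" []) (pvLoop "migrations/" ((PySem.Dict.mk classification).getD "migrate" []) (pvLoop "tools/" (((PySem.Dict.mk classification).getD "create" []) ++ ((PySem.Dict.mk classification).getD "assign" []) ++ ((PySem.Dict.mk classification).getD "wait" [])) (pvLoop "analysis/" ((PySem.Dict.mk classification).getD "analyze" []) (pvLoop "monitoring/" ((PySem.Dict.mk classification).getD "monitor" []) (pvLoop "checks/" ((PySem.Dict.mk classification).getD "check" []) (pvLoop "verification/" ((PySem.Dict.mk classification).getD "verify" []) (pvLoop "testing/" ((PySem.Dict.mk classification).getD "test" []) (PySem.Dict.mk [("testing/", ([] : List (String × String))), ("verification/", []), ("checks/", []), ("monitoring/", []), ("analysis/", []), ("tools/", []), ("migrations/", []), ("setup/", []), ("scripts/", [])])))))))) (by rw [k7]; decide) ((PySem.Dict.contains_iff_mem_keys _ _).mpr (by rw [k7]; decide))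
  have i9 := pvLoop_items "scripts/" ((PySem.Dict.mk classification).getD "wrapper" []) (pvLoop "setup/" ((PySem.Dict.mk classification).getD "setup" []) (pvLoop "migrations/" ((PySem.Dict.mk classification).getD "migrate" []) (pvLoop "tools/" (((PySem.Dict.mk classification).getD "create" []) ++ ((PySem.Dict.mk classification).getD "assign" []) ++ ((PySem.Dict.mk classification).getD "wait" [])) (pvLoop "analysis/" ((PySem.Dict.mk classification).getD "analyze" []) (pvLoop "monitoring/" ((PySem.Dict.mk classification).getD "monitor" []) (pvLoop "checks/" ((PySem.Dict.mk classification).getD "check" []) (pvLoop "verification/" ((PySem.Dict.mk classification).getD "verify" []) (pvLoop "testing/" ((PySem.Dict.mk classification).getD "test" []) (PySem.Dict.mk [("testing/", ([] : List (String × String))), ("verification/", []), ("checks/", []), ("monitoring/", []), ("analysis/", []), ("tools/", []), ("migrations/", []), ("setup/", []), ("scripts/", [])]))))))))) (by rw [k8]; decide) ((PySem.Dict.contains_iff_mem_keys _ _).mpr (by rw [k8]; decide))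
  have i10 := pvLoop_items "tools/" ((PySem.Dict.mk classification).getD "other" []) (pvLoop "scripts/" ((PySem.Dict.mk classification).getD "wrapper" []) (pvLoop "setup/" ((PySem.Dict.mk classification).getD "setup" []) (pvLoop "migrations/" ((PySem.Dict.mk classification).getD "migrate" []) (pvLoop "tools/" (((PySem.Dict.mk classification).getD "create" []) ++ ((PySem.Dict.mk classification).getD "assign" []) ++ ((PySem.Dict.mk classification).getD "wait" [])) (pvLoop "analysis/" ((PySem.Dict.mk classification).getD "analyze" []) (pvLoop "monitoring/" ((PySem.Dict.mk classification).getD "monitor" []) (pvLoop "checks/" ((PySem.Dict.mk classification).getD "check" []) (pvLoop "verification/" ((PySem.Dict.mk classification).getD "verify" []) (pvLoop "testing/" ((PySem.Dict.mk classification).getD "test" []) (PySem.Dict.mk [("testing/", ([] : List (String × String))), ("verification/", []), ("checks/", []), ("monitoring/", []), ("analysis/", []), ("tools/", []), ("migrations/", []), ("setup/", []), ("scripts/", [])])))))))))) (by rw [k9]; decide) ((PySem.Dict.contains_iff_mem_keys _ _).mpr (by rw [k9]; decide))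
  have hmap : ((pvLoop "tools/" ((PySem.Dict.mk classification).getD "other" []) (pvLoop "scripts/" ((PySem.Dict.mk classification).getD "wrapper" []) (pvLoop "setup/" ((PySem.Dict.mk classification).getD "setup" []) (pvLoop "migrations/" ((PySem.Dict.mk classification).getD "migrate" []) (pvLoop "tools/" (((PySem.Dict.mk classification).getD "create" []) ++ ((PySem.Dict.mk classification).getD "assign" []) ++ ((PySem.Dict.mk classification).getD "wait" [])) (pvLoop "analysis/" ((PySem.Dict.mk classification).getD "analyze" []) (pvLoop "monitoring/" ((PySem.Dict.mk classification).getD "monitor" []) (pvLoop "checks/" ((PySem.Dict.mk classification).getD "check" []) (pvLoop "verification/" ((PySem.Dict.mk classification).getD "verify" []) (pvLoop "testing/" ((PySem.Dict.mk classification).getD "test" []) (PySem.Dict.mk [("testing/", ([] : List (String × String))), ("verification/", []), ("checks/", []), ("monitoring/", []), ("analysis/", []), ("tools/", []), ("migrations/", []), ("setup/", []), ("scripts/", [])])))))))))))).items = pvTable.map (pvE classification) := by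
    rw [i10, i9, i8, i7, i6, i5, i4, i3, i2, i1]
    simp [pvTable, pvE]
  rw [hmap, List.filter_map]
  rfl

-- ===== VERDICT (by name: the statement is the Claim_ definition above) =====
theorem generate_migration_plan_spec : Claim_equal_generate_migration_plan := by
  intro cls _ hpre
  exact generate_migration_plan_eq cls hpre
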